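-- pv_equiv track=rewrite | github.com/keras-team/keras | Lib/site-packages/opt_einsum/contract.py | format_const_einsum_str
-- ===== SOURCE A (Python) =====
-- from typing import Any, Collection, Dict, Iterable, List, Literal, Optional, Sequence, Tuple, Union, overload
--
-- def format_const_einsum_str(einsum_str: str, constants: Iterable[int]) -> str:
--     """Add brackets to the constant terms in ``einsum_str``. For example:
--
--         >>> format_const_einsum_str('ab,bc,cd->ad', [0, 2])
--         'bc,[ab,cd]->ad'
--
--     No-op if there are no constants.
--     """
--     if not constants:
--         return einsum_str
--
--     if "->" in einsum_str:
--         lhs, rhs = einsum_str.split("->")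
--         arrow = "->"
--     else:
--         lhs, rhs, arrow = einsum_str, "", ""
--
--     wrapped_terms = [f"[{t}]" if i in constants else t for i, t in enumerate(lhs.split(","))]
--
--     formatted_einsum_str = "{}{}{}".format(",".join(wrapped_terms), arrow, rhs)
--
--     # merge adjacent constants
--     formatted_einsum_str = formatted_einsum_str.replace("],[", ",")
--     return formatted_einsum_str
-- ===== SOURCE B (Python) =====
-- def format_const_einsum_str(einsum_str: str, constants) -> str:
--     """Bracket constant terms by grouping maximal runs of consecutive
--     constant indices in one pass (no post-hoc string .replace)."""
--     if not constants:
--         return einsum_str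
--
--     if "->" in einsum_str:
--         lhs, rhs = einsum_str.split("->")
--         arrow = "->"
--     else:
--         lhs, rhs, arrow = einsum_str, "", ""
--
--     pieces = []
--     run = []
--     for i, t in enumerate(lhs.split(",")):
--         if i in constants:
--             run.append(t)
--         else:
--             if run:
--                 pieces.append("[" + ",".join(run) + "]")
--                 run = []
--             pieces.append(t)
--     if run:
--         pieces.append("[" + ",".join(run) + "]")
--     return ",".join(pieces) + arrow + rhs
-- ===== Notes on version B (the rewrite author's own statement) =====
-- stated objective: alternative
-- what changed: B groups maximal runs of consecutive constant terms in a single pass over the split terms and emits each run bracketed once, instead of wrapping every constant term and then merging adjacent brackets with a whole-string '],['->',' replace.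
-- outside the precondition, e.g. on format_const_einsum_str('a],[b', [0]): A returns '[a],b', B returns '[a]],[b'
import Mathlib
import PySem

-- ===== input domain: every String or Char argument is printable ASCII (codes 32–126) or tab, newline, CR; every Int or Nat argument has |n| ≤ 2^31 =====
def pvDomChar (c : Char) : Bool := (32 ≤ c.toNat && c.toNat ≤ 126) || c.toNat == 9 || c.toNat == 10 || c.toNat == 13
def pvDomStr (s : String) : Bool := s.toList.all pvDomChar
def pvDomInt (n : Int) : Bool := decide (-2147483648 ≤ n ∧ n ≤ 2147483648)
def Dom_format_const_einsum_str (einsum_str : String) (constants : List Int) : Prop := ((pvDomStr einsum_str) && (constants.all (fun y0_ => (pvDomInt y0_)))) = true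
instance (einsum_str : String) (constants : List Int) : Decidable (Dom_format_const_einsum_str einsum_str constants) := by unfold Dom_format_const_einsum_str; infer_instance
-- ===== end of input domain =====

-- B brackets maximal runs of consecutive constant terms in one grouping pass instead of
-- wrapping each constant term and merging adjacent brackets with a whole-string replace
-- (objective: alternative decomposition, same cost).


-- ===== PORT A =====
def format_const_einsum_str (einsum_str : String) (constants : List Int) : String :=
  if constants.isEmpty then einsum_str else
  let s := einsum_str.toList
  let p :=
    if PySem.Chars.isIn ['-','>'] s then
      match PySem.Chars.splitOn s ['-','>'] with
      | [l, r] => (l, r, ['-','>'])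
      | _ => ([], [], [])   -- Python raises ValueError here (excluded by Pre_)
    else (s, ([] : List Char), ([] : List Char))
  let wrapped := (PySem.List.enumerate (PySem.Chars.splitOn p.1 [','])).map
      (fun q => if constants.contains q.1 then '[' :: q.2 ++ [']'] else q.2)
  let formatted := PySem.Chars.join [','] wrapped ++ p.2.2 ++ p.2.1
  String.ofList (PySem.Chars.replace formatted [']', ',', '['] [','])

-- ===== PORT B =====
def format_const_einsum_str_alt (einsum_str : String) (constants : List Int) : String :=
  if constants.isEmpty then einsum_str else
  let s := einsum_str.toList
  let p :=
    if PySem.Chars.isIn ['-','>'] s then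
      match PySem.Chars.splitOn s ['-','>'] with
      | l :: r :: [] => (l, r, ['-','>'])
      | [] => ([], [], [])   -- Python raises ValueError here (excluded by Pre_)
      | [_] => ([], [], [])
      | _ :: _ :: _ :: _ => ([], [], [])
    else (s, ([] : List Char), ([] : List Char))
  let st := (PySem.List.enumerate (PySem.Chars.splitOn p.1 [','])).foldl
      (fun (st : List (List Char) × List (List Char)) q =>
        if constants.contains q.1 then (st.1, st.2 ++ [q.2])
        else ((if st.2.isEmpty then st.1 else st.1 ++ ['[' :: PySem.Chars.join [','] st.2 ++ [']']]) ++ [q.2], []))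
      ([], [])
  let pieces := if st.2.isEmpty then st.1 else st.1 ++ ['[' :: PySem.Chars.join [','] st.2 ++ [']']]
  String.ofList (PySem.Chars.join [','] pieces ++ p.2.2 ++ p.2.1)

-- ===== PRECONDITION & SPEC =====
-- Pre_ excludes (when constants is non-empty): einsum strings with more than one "->", on which
-- A's two-way unpack RAISES ValueError; and einsum strings containing a literal '[' or ']', on
-- which A's blanket "],[" -> "," replace can also rewrite user bracket characters — an accidental
-- artefact of A's implementation that is as defensible as B's plain grouping there.
def Pre_format_const_einsum_str (einsum_str : String) (constants : List Int) : Prop :=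
  constants = [] ∨
    ((PySem.Chars.splitOn einsum_str.toList ['-','>']).length ≤ 2 ∧
     PySem.Chars.isIn ['['] einsum_str.toList = false ∧
     PySem.Chars.isIn [']'] einsum_str.toList = false)
instance (einsum_str : String) (constants : List Int) : Decidable (Pre_format_const_einsum_str einsum_str constants) := by
  unfold Pre_format_const_einsum_str; infer_instance

def pvWitness_format_const_einsum_str : String × List Int := ("ab,bc,cd->ad", [0, 2])

def Spec_format_const_einsum_str (einsum_str : String) (constants : List Int) (out : String) : Prop := out = format_const_einsum_str_alt einsum_str constants
instance (einsum_str : String) (constants : List Int) (out : String) : Decidable (Spec_format_const_einsum_str einsum_str constants out) := by unfold Spec_format_const_einsum_str; infer_instance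

-- ===== CLAIM (what is proved, stated in full; the proofs are below) =====
def Claim_equal_format_const_einsum_str : Prop := ∀ (einsum_str : String) (constants : List Int), Dom_format_const_einsum_str einsum_str constants → Pre_format_const_einsum_str einsum_str constants → Spec_format_const_einsum_str einsum_str constants (format_const_einsum_str einsum_str constants)

-- ===== LEMMAS AND PROOFS =====


def pvWrapRun (run : List (List Char)) : List Char := '[' :: List.intercalate [','] run ++ [']']
def pvGroup : Option (List (List Char)) → List (Bool × List Char) → List (List Char)
  | none, [] => []
  | some run, [] => [pvWrapRun run]
  | none, (true, t) :: rest => pvGroup (some [t]) rest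
  | none, (false, t) :: rest => t :: pvGroup none rest
  | some run, (true, t) :: rest => pvGroup (some (run ++ [t])) rest
  | some run, (false, t) :: rest => pvWrapRun run :: t :: pvGroup none rest

def pvWrap1 (p : Bool × List Char) : List Char := if p.1 then '[' :: p.2 ++ [']'] else p.2
def pvSS (fs : List (Bool × List Char)) : List Char := List.intercalate [','] (fs.map pvWrap1)
def pvRR : List (Bool × List Char) → List Char
  | [] => []
  | fs => ',' :: pvSS fs
def pvDD : List (Bool × List Char) → List Char → List Char
  | (true, t) :: rest, tail => ',' :: (t ++ pvDD rest tail)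
  | [], tail => ']' :: tail
  | (false, t) :: rest, tail => ']' :: ',' :: (List.intercalate [','] (pvGroup none ((false, t) :: rest)) ++ tail)

theorem pv_intercalate_cons_ne (sep a : List Char) (ps : List (List Char)) (h : ps ≠ []) :
    List.intercalate sep (a :: ps) = a ++ sep ++ List.intercalate sep ps := by
  cases ps with
  | nil => exact absurd rfl h
  | cons b t => simp [List.intercalate]

theorem pv_mem_intercalate {c : Char} {t : List Char} {sep : List Char} {ts : List (List Char)}
    (ht : t ∈ ts) (hc : c ∈ t) : c ∈ List.intercalate sep ts := by
  induction ts with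
  | nil => simp at ht
  | cons a r ih =>
    cases r with
    | nil => simp at ht; simpa [List.intercalate, ht] using hc
    | cons b r' =>
      rw [pv_intercalate_cons_ne _ _ _ (by simp)]
      rcases List.mem_cons.1 ht with h | h
      · subst h; simp [hc]
      · simp [ih h]

theorem pv_intercalate_append_singleton (run : List (List Char)) (t : List Char) (h : run ≠ []) :
    List.intercalate [','] (run ++ [t]) = List.intercalate [','] run ++ ',' :: t := by
  induction run with
  | nil => exact absurd rfl h
  | cons a r ih =>
    cases r with
    | nil => simp [List.intercalate]
    | cons b r' =>
      rw [List.cons_append, pv_intercalate_cons_ne _ _ _ (by simp), pv_intercalate_cons_ne _ _ _ (by simp),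
        ih (by simp)]
      simp

theorem pv_sgo (sep : List Char) (hsep : sep ≠ []) :
    ∀ (fuel : Nat) (l cur : List Char) (acc : List (List Char)),
    l.length < fuel →
    (∀ v w, cur = v ++ w → v ≠ [] → ¬ sep <+: (v.reverse ++ l)) →
    ∃ ps, PySem.Chars.splitOn.go sep fuel l cur acc = acc.reverse ++ ps ∧ ps ≠ [] ∧
      List.intercalate sep ps = cur.reverse ++ l ∧ ∀ p ∈ ps, ¬ sep <:+: p := by
  intro fuel
  induction fuel with
  | zero => intro l cur acc h _; omega
  | succ f ih =>
    intro l cur acc hlen hinv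
    have hcurfree : ∀ l', (∀ v w, cur = v ++ w → v ≠ [] → ¬ sep <+: (v.reverse ++ l')) → ¬ sep <:+: cur.reverse := by
      intro l' hinv' hsub
      obtain ⟨x, y, hxy⟩ := hsub
      have hcur : cur = y.reverse ++ sep.reverse ++ x.reverse := by
        have := congrArg List.reverse hxy
        simpa [List.reverse_append] using this.symm
      refine hinv' (y.reverse ++ sep.reverse) x.reverse (by simpa using hcur) (by simp [hsep]) ?_
      refine ⟨y ++ l', by simp [List.reverse_append]⟩
    cases l with
    | nil =>
      refine ⟨[cur.reverse], by simp [PySem.Chars.splitOn.go], by simp, by simp [List.intercalate], ?_⟩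
      intro p hp
      simp at hp
      subst hp
      exact hcurfree [] hinv
    | cons c rest =>
      by_cases hp : sep.isPrefixOf (c :: rest) = true
      · have hpre : sep <+: (c :: rest) := List.isPrefixOf_iff_prefix.1 hp
        obtain ⟨u, hu⟩ := hpre
        have hstep : PySem.Chars.splitOn.go sep (f+1) (c :: rest) cur acc =
            PySem.Chars.splitOn.go sep f ((c :: rest).drop sep.length) [] (cur.reverse :: acc) := by
          simp [PySem.Chars.splitOn.go, hp]
        have hdrop : (c :: rest).drop sep.length = u := by
          rw [← hu, List.drop_append_of_le_length (by simp)]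
          simp
        have hlen' : u.length < f := by
          have : sep.length + u.length = rest.length + 1 := by
            have := congrArg List.length hu; simpa using this
          have hs1 : 1 ≤ sep.length := by cases sep; simp at hsep; simp
          simp at hlen; omega
        obtain ⟨ps', e1, e2, e3, e4⟩ := ih u [] (cur.reverse :: acc) hlen' (by intro v w hv hne; simp at hv; exact absurd hv.1 hne)
        refine ⟨cur.reverse :: ps', ?_, by simp, ?_, ?_⟩
        · rw [hstep, hdrop, e1]; simp
        · rw [pv_intercalate_cons_ne _ _ _ e2, e3]
          simp [← hu]
        · intro p hpm
          rcases List.mem_cons.1 hpm with h | h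
          · subst h; exact hcurfree (c :: rest) hinv
          · exact e4 p h
      · have hstep : PySem.Chars.splitOn.go sep (f+1) (c :: rest) cur acc =
            PySem.Chars.splitOn.go sep f rest (c :: cur) acc := by
          simp [PySem.Chars.splitOn.go, hp]
        have hinv' : ∀ v w, c :: cur = v ++ w → v ≠ [] → ¬ sep <+: (v.reverse ++ rest) := by
          intro v w hv hne
          cases v with
          | nil => exact absurd rfl hne
          | cons c' v' =>
            have hc : c' = c := by simpa using congrArg (fun l => l.headD ' ') hv.symm
            subst hc
            have hcur : cur = v' ++ w := by simpa using hv
            cases v' with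
            | nil =>
              intro hsp
              exact hp (List.isPrefixOf_iff_prefix.2 (by simpa using hsp))
            | cons d v'' =>
              have := hinv (d :: v'') w hcur (by simp)
              intro hsp
              exact this (by simpa [List.append_assoc] using hsp)
        obtain ⟨ps, e1, e2, e3, e4⟩ := ih rest (c :: cur) acc (by simp at hlen ⊢; omega) hinv'
        exact ⟨ps, by rw [hstep, e1], e2, by rw [e3]; simp, e4⟩

theorem pv_splitOn_spec (sep : List Char) (s : List Char) (hsep : sep ≠ []) :
    (PySem.Chars.splitOn s sep ≠ [] ∧
     List.intercalate sep (PySem.Chars.splitOn s sep) = s ∧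
     ∀ p ∈ PySem.Chars.splitOn s sep, ¬ sep <:+: p) := by
  obtain ⟨ps, h1, h2, h3, h4⟩ := pv_sgo sep hsep (s.length + 1) s [] [] (by omega)
    (by intro v w hv hne; simp at hv; exact absurd hv.1 hne)
  rw [show PySem.Chars.splitOn s sep = PySem.Chars.splitOn.go sep (s.length + 1) s [] [] from rfl, h1]
  simpa [h2, h3] using h4

theorem pv_group_some_ne (fs : List (Bool × List Char)) (run : List (List Char)) :
    pvGroup (some run) fs ≠ [] := by
  induction fs generalizing run with
  | nil => simp [pvGroup]
  | cons p rest ih =>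
    obtain ⟨b, t⟩ := p
    cases b <;> simp [pvGroup, ih]

theorem pv_group_none_ne (fs : List (Bool × List Char)) (h : fs ≠ []) :
    pvGroup none fs ≠ [] := by
  cases fs with
  | nil => exact absurd rfl h
  | cons p rest =>
    obtain ⟨b, t⟩ := p
    cases b <;> simp [pvGroup, pv_group_some_ne]

theorem pv_GD (fs : List (Bool × List Char)) :
    ∀ (run : List (List Char)) (tail : List Char), run ≠ [] →
    List.intercalate [','] (pvGroup (some run) fs) ++ tail =
      '[' :: (List.intercalate [','] run ++ pvDD fs tail) := by
  induction fs with
  | nil =>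
    intro run tail hrun
    simp [pvGroup, pvDD, pvWrapRun, List.intercalate]
  | cons p rest ih =>
    obtain ⟨b, t⟩ := p
    intro run tail hrun
    cases b with
    | true =>
      rw [show pvGroup (some run) ((true, t) :: rest) = pvGroup (some (run ++ [t])) rest from rfl,
        ih (run ++ [t]) tail (by simp), pv_intercalate_append_singleton run t hrun]
      simp [pvDD]
    | false =>
      rw [show pvGroup (some run) ((false, t) :: rest) = pvWrapRun run :: t :: pvGroup none rest from rfl]
      rw [pv_intercalate_cons_ne _ _ _ (by simp)]
      rw [show pvDD ((false, t) :: rest) tail = ']' :: ',' :: (List.intercalate [','] (pvGroup none ((false, t) :: rest)) ++ tail) from rfl]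
      rw [show pvGroup none ((false, t) :: rest) = t :: pvGroup none rest from rfl]
      simp [pvWrapRun]

theorem pv_fold_group :
    ∀ (fs : List (Bool × List Char)) (pieces run : List (List Char)),
    (let st := fs.foldl
        (fun (st : List (List Char) × List (List Char)) (q : Bool × List Char) =>
          if q.1 then (st.1, st.2 ++ [q.2])
          else ((if st.2.isEmpty then st.1 else st.1 ++ ['[' :: PySem.Chars.join [','] st.2 ++ [']']]) ++ [q.2], []))
        (pieces, run)
     (if st.2.isEmpty then st.1 else st.1 ++ ['[' :: PySem.Chars.join [','] st.2 ++ [']']])) =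
      pieces ++ (if run.isEmpty then pvGroup none fs else pvGroup (some run) fs) := by
  intro fs
  induction fs with
  | nil =>
    intro pieces run
    cases run <;> simp [pvGroup, pvWrapRun, PySem.Chars.join]
  | cons p rest ih =>
    intro pieces run
    obtain ⟨b, t⟩ := p
    cases b with
    | true =>
      simp only [List.foldl_cons, reduceIte]
      rw [ih pieces (run ++ [t])]
      cases run <;> simp [pvGroup]
    | false =>
      simp only [List.foldl_cons, Bool.false_eq_true, if_false]
      rw [ih ((if run.isEmpty then pieces else pieces ++ ['[' :: PySem.Chars.join [','] run ++ [']']]) ++ [t]) []]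
      cases run <;> simp [pvGroup, pvWrapRun, PySem.Chars.join]
def pvOld : List Char := [']', ',', '[']
def pvOkT (t : List Char) : Prop := '[' ∉ t ∧ ']' ∉ t ∧ ',' ∉ t
def pvOkTail (t : List Char) : Prop := '[' ∉ t ∧ ']' ∉ t

theorem pv_rgo_nil (old new : List Char) (fuel : Nat) (acc : List Char) :
    PySem.Chars.replace.go old new fuel [] acc = acc.reverse := by
  cases fuel <;> simp [PySem.Chars.replace.go]

theorem pv_rgo_skip (o' new a b acc : List Char) (fuel : Nat) (ha : ']' ∉ a)
    (hf : a.length + b.length ≤ fuel) :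
    PySem.Chars.replace.go (']' :: o') new fuel (a ++ b) acc =
      PySem.Chars.replace.go (']' :: o') new (fuel - a.length) b (a.reverse ++ acc) := by
  induction a generalizing acc fuel with
  | nil => simp
  | cons c a' ih =>
    cases fuel with
    | zero => simp at hf
    | succ f =>
      have hc : c ≠ ']' := by intro h; exact ha (by simp [h])
      have hpre : (']' :: o').isPrefixOf (c :: (a' ++ b)) = false := by
        simp [List.isPrefixOf]; intro h; exact absurd h.symm hc
      rw [List.cons_append, show PySem.Chars.replace.go (']' :: o') new (f+1) (c :: (a' ++ b)) acc =
        PySem.Chars.replace.go (']' :: o') new f (a' ++ b) (c :: acc) by simp [PySem.Chars.replace.go, hpre]]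
      rw [ih (c :: acc) f (by intro h; exact ha (by simp [h])) (by simp at hf ⊢; omega)]
      simp

theorem pv_rgo_tail (o' new b acc : List Char) (fuel : Nat) (hb : ']' ∉ b) (hf : b.length ≤ fuel) :
    PySem.Chars.replace.go (']' :: o') new fuel b acc = acc.reverse ++ b := by
  have := pv_rgo_skip o' new b [] acc fuel hb (by simpa using hf)
  simpa [pv_rgo_nil] using this

theorem pv_rgo_nomatch (new : List Char) (c : Char) (t acc : List Char) (f : Nat)
    (h : pvOld.isPrefixOf (c :: t) = false) :
    PySem.Chars.replace.go pvOld new (f+1) (c :: t) acc =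
      PySem.Chars.replace.go pvOld new f t (c :: acc) := by
  simp [PySem.Chars.replace.go, h]

theorem pv_rgo_match3 (x acc : List Char) (f : Nat) :
    PySem.Chars.replace.go pvOld [','] (f+1) (']' :: ',' :: '[' :: x) acc =
      PySem.Chars.replace.go pvOld [','] f x (',' :: acc) := by
  have h : pvOld.isPrefixOf (']' :: ',' :: '[' :: x) = true := by simp [pvOld, List.isPrefixOf]
  simp [PySem.Chars.replace.go, pvOld]

theorem pv_notpre_tail (tail : List Char) (h : '[' ∉ tail) :
    pvOld.isPrefixOf (']' :: tail) = false := by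
  match tail with
  | [] => rfl
  | [c] => simp [pvOld, List.isPrefixOf]
  | c :: d :: u =>
    simp [pvOld, List.isPrefixOf]
    intro _ hd
    exact absurd (by simp [← hd]) h

theorem pv_notL_head (t tail : List Char) (rest : List (Bool × List Char))
    (h1 : '[' ∉ t) (h2 : '[' ∉ tail) :
    pvOld.isPrefixOf (']' :: ',' :: (t ++ (pvRR rest ++ tail))) = false := by
  have key : ∀ x : List Char, x = t ++ (pvRR rest ++ tail) → ['['].isPrefixOf x = false := by
    intro x hx
    cases t with
    | cons c t' =>
      subst hx; simp [List.isPrefixOf]; intro hc; exact absurd (by simp [← hc]) h1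
    | nil =>
      cases rest with
      | cons p r =>
        subst hx; simp [pvRR, List.isPrefixOf]
      | nil =>
        cases tail with
        | nil => subst hx; rfl
        | cons c u =>
          subst hx; simp [pvRR, List.isPrefixOf]
          intro hc; exact absurd (by simp [← hc]) h2
  simp [pvOld, List.isPrefixOf]
  exact key _ rfl

theorem pvSS_nil : pvSS [] = [] := by simp [pvSS, List.intercalate]

theorem pvSS_cons (p : Bool × List Char) (rest : List (Bool × List Char)) :
    pvSS (p :: rest) = pvWrap1 p ++ pvRR rest := by
  cases rest with
  | nil => simp [pvSS, pvRR, List.intercalate]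
  | cons q r =>
    rw [pvSS, List.map_cons, pv_intercalate_cons_ne _ _ _ (by simp)]
    simp [pvRR, pvSS]

theorem pv_mainA (n : Nat) : ∀ (fs : List (Bool × List Char)), fs.length ≤ n →
    (∀ (tail acc : List Char) (fuel : Nat), (∀ p ∈ fs, pvOkT p.2) → pvOkTail tail →
      (pvSS fs ++ tail).length ≤ fuel →
      PySem.Chars.replace.go pvOld [','] fuel (pvSS fs ++ tail) acc =
        acc.reverse ++ (List.intercalate [','] (pvGroup none fs) ++ tail)) ∧
    (∀ (tail acc : List Char) (fuel : Nat), (∀ p ∈ fs, pvOkT p.2) → pvOkTail tail →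
      ((']' :: pvRR fs) ++ tail).length ≤ fuel →
      PySem.Chars.replace.go pvOld [','] fuel ((']' :: pvRR fs) ++ tail) acc =
        acc.reverse ++ pvDD fs tail) := by
  induction n with
  | zero =>
    intro fs hfs
    have hfs0 : fs = [] := by
      cases fs with
      | nil => rfl
      | cons a b => simp at hfs
    subst hfs0
    constructor
    · intro tail acc fuel _ htail hfuel
      rw [pvSS_nil] at hfuel ⊢
      rw [show pvOld = ']' :: [',', '['] from rfl,
        pv_rgo_tail _ _ _ _ _ (by simpa using htail.2) (by simpa using hfuel)]
      simp [pvGroup, List.intercalate]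
    · intro tail acc fuel _ htail hfuel
      rw [show pvRR [] = [] from rfl] at hfuel ⊢
      simp only [List.nil_append, List.cons_append]
      cases fuel with
      | zero => simp at hfuel
      | succ f =>
        rw [pv_rgo_nomatch _ _ _ _ _ (pv_notpre_tail tail htail.1)]
        rw [show pvOld = ']' :: [',', '['] from rfl,
          pv_rgo_tail _ _ _ _ _ htail.2 (by simp at hfuel; omega)]
        simp [pvDD]
  | succ m ihm =>
    intro fs hfs
    have hA1 : ∀ (tail acc : List Char) (fuel : Nat), (∀ p ∈ fs, pvOkT p.2) → pvOkTail tail →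
        (pvSS fs ++ tail).length ≤ fuel →
        PySem.Chars.replace.go pvOld [','] fuel (pvSS fs ++ tail) acc =
          acc.reverse ++ (List.intercalate [','] (pvGroup none fs) ++ tail) := by
      intro tail acc fuel hok htail hfuel
      cases fs with
      | nil =>
        rw [pvSS_nil] at hfuel ⊢
        rw [show pvOld = ']' :: [',', '['] from rfl,
          pv_rgo_tail _ _ _ _ _ (by simpa using htail.2) (by simpa using hfuel)]
        simp [pvGroup, List.intercalate]
      | cons p rest =>
        obtain ⟨b, t⟩ := p
        have hokt : pvOkT t := hok (b, t) (List.mem_cons_self)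
        have hokr : ∀ q ∈ rest, pvOkT q.2 := fun q hq => hok q (List.mem_cons_of_mem _ hq)
        cases b with
        | false =>
          rw [pvSS_cons] at hfuel ⊢
          rw [show pvWrap1 (false, t) = t from rfl] at hfuel ⊢
          cases rest with
          | nil =>
            rw [show pvRR [] = [] from rfl] at hfuel ⊢
            rw [show pvOld = ']' :: [',', '['] from rfl]
            rw [show (t ++ [] : List Char) ++ tail = t ++ tail by simp]
            rw [pv_rgo_skip _ _ _ _ _ _ hokt.2.1 (by simp at hfuel ⊢; omega)]
            rw [pv_rgo_tail _ _ _ _ _ htail.2 (by simp at hfuel ⊢; omega)]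
            simp [pvGroup, List.intercalate]
          | cons p2 rest2 =>
            rw [show pvRR (p2 :: rest2) = ',' :: pvSS (p2 :: rest2) from rfl] at hfuel ⊢
            rw [show (t ++ ',' :: pvSS (p2 :: rest2)) ++ tail =
              (t ++ [',']) ++ (pvSS (p2 :: rest2) ++ tail) by simp]
            rw [show pvOld = ']' :: [',', '['] from rfl]
            rw [pv_rgo_skip _ _ _ _ _ _ (by
              intro h; rcases List.mem_append.1 h with h | h
              · exact hokt.2.1 h
              · simp at h) (by simp at hfuel ⊢; omega)]
            rw [show (']' :: [',', '['] : List Char) = pvOld from rfl]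
            rw [(ihm (p2 :: rest2) (by simp at hfs ⊢; omega)).1 tail ((t ++ [',']).reverse ++ acc) _
              hokr htail (by simp at hfuel ⊢; omega)]
            rw [show pvGroup none ((false, t) :: p2 :: rest2) = t :: pvGroup none (p2 :: rest2) from rfl]
            rw [pv_intercalate_cons_ne _ _ _ (pv_group_none_ne _ (by simp))]
            simp
        | true =>
          rw [pvSS_cons] at hfuel ⊢
          rw [show pvWrap1 (true, t) = '[' :: t ++ [']'] from rfl] at hfuel ⊢
          rw [show (('[' :: t ++ [']']) ++ pvRR rest) ++ tail =
            ('[' :: t) ++ ((']' :: pvRR rest) ++ tail) by simp]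
          rw [show pvOld = ']' :: [',', '['] from rfl]
          rw [pv_rgo_skip _ _ _ _ _ _ (by
            intro h; rcases List.mem_cons.1 h with h | h
            · simp at h
            · exact hokt.2.1 h) (by simp at hfuel ⊢; omega)]
          rw [show (']' :: [',', '['] : List Char) = pvOld from rfl]
          rw [(ihm rest (by simp at hfs ⊢; omega)).2 tail (('[' :: t).reverse ++ acc) _
            hokr htail (by simp at hfuel ⊢; omega)]
          rw [show pvGroup none ((true, t) :: rest) = pvGroup (some [t]) rest from rfl]
          rw [pv_GD rest [t] tail (by simp)]
          simp [List.intercalate]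
    refine ⟨hA1, ?_⟩
    intro tail acc fuel hok htail hfuel
    cases fs with
    | nil =>
      rw [show pvRR [] = [] from rfl] at hfuel ⊢
      simp only [List.nil_append, List.cons_append]
      cases fuel with
      | zero => simp at hfuel
      | succ f =>
        rw [pv_rgo_nomatch _ _ _ _ _ (pv_notpre_tail tail htail.1)]
        rw [show pvOld = ']' :: [',', '['] from rfl,
          pv_rgo_tail _ _ _ _ _ htail.2 (by simp at hfuel; omega)]
        simp [pvDD]
    | cons p rest =>
      obtain ⟨b, t⟩ := p
      have hokt : pvOkT t := hok (b, t) (List.mem_cons_self)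
      have hokr : ∀ q ∈ rest, pvOkT q.2 := fun q hq => hok q (List.mem_cons_of_mem _ hq)
      cases b with
      | true =>
        rw [show pvRR ((true, t) :: rest) = ',' :: pvSS ((true, t) :: rest) from rfl] at hfuel ⊢
        rw [pvSS_cons, show pvWrap1 (true, t) = '[' :: t ++ [']'] from rfl] at hfuel ⊢
        rw [show (']' :: ',' :: (('[' :: t ++ [']']) ++ pvRR rest)) ++ tail =
          ']' :: ',' :: '[' :: (t ++ ((']' :: pvRR rest) ++ tail)) by simp]
        cases fuel with
        | zero => simp at hfuel
        | succ f =>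
          rw [pv_rgo_match3]
          rw [show pvOld = ']' :: [',', '['] from rfl]
          rw [pv_rgo_skip _ _ _ _ _ _ hokt.2.1 (by simp at hfuel ⊢; omega)]
          rw [show (']' :: [',', '['] : List Char) = pvOld from rfl]
          rw [(ihm rest (by simp at hfs ⊢; omega)).2 tail (t.reverse ++ (',' :: acc)) _
            hokr htail (by simp at hfuel ⊢; omega)]
          rw [show pvDD ((true, t) :: rest) tail = ',' :: (t ++ pvDD rest tail) from rfl]
          simp
      | false =>
        rw [show pvRR ((false, t) :: rest) = ',' :: pvSS ((false, t) :: rest) from rfl] at hfuel ⊢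
        cases fuel with
        | zero => simp at hfuel
        | succ f =>
          rw [show (']' :: ',' :: pvSS ((false, t) :: rest)) ++ tail =
            ']' :: ',' :: (pvSS ((false, t) :: rest) ++ tail) by simp]
          rw [pv_rgo_nomatch _ _ _ _ _ (by
            rw [pvSS_cons, show pvWrap1 (false, t) = t from rfl, List.append_assoc]
            exact pv_notL_head t tail rest hokt.1 htail.1)]
          rw [show (',' :: (pvSS ((false, t) :: rest) ++ tail)) =
            [','] ++ (pvSS ((false, t) :: rest) ++ tail) from rfl]
          rw [show pvOld = ']' :: [',', '['] from rfl]
          rw [pv_rgo_skip _ _ _ _ _ _ (by simp) (by simp at hfuel ⊢; omega)]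
          rw [show (']' :: [',', '['] : List Char) = pvOld from rfl]
          rw [hA1 tail ([','].reverse ++ (']' :: acc)) _ hok htail (by simp at hfuel ⊢; omega)]
          rw [show pvDD ((false, t) :: rest) tail =
            ']' :: ',' :: (List.intercalate [','] (pvGroup none ((false, t) :: rest)) ++ tail) from rfl]
          simp


theorem pv_enum_mem {α : Type} {q : Int × α} {ts : List α} {k : Int}
    (h : q ∈ PySem.List.enumerate ts k) : q.2 ∈ ts := by
  induction ts generalizing k with
  | nil => simp [PySem.List.enumerate] at h
  | cons a r ih =>
    rw [PySem.List.enumerate] at h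
    rcases List.mem_cons.1 h with h | h
    · subst h; simp
    · exact List.mem_cons_of_mem _ (ih h)

theorem pv_final (lhs tail : List Char) (cs : List Int)
    (h1 : '[' ∉ lhs) (h2 : ']' ∉ lhs) (h3 : pvOkTail tail) :
    PySem.Chars.replace
        (PySem.Chars.join [','] ((PySem.List.enumerate (PySem.Chars.splitOn lhs [','])).map
          (fun q => if cs.contains q.1 then '[' :: q.2 ++ [']'] else q.2)) ++ tail)
        [']', ',', '['] [','] =
      PySem.Chars.join [',']
        (let st := (PySem.List.enumerate (PySem.Chars.splitOn lhs [','])).foldl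
            (fun (st : List (List Char) × List (List Char)) q =>
              if cs.contains q.1 then (st.1, st.2 ++ [q.2])
              else ((if st.2.isEmpty then st.1 else st.1 ++ ['[' :: PySem.Chars.join [','] st.2 ++ [']']]) ++ [q.2], []))
            ([], [])
         (if st.2.isEmpty then st.1 else st.1 ++ ['[' :: PySem.Chars.join [','] st.2 ++ [']']])) ++ tail := by
  obtain ⟨hne, hint, hfree⟩ := pv_splitOn_spec [','] lhs (by simp)
  have hok : ∀ p ∈ PySem.Chars.splitOn lhs [','], pvOkT p := by
    intro p hp
    refine ⟨fun hc => h1 (hint ▸ pv_mem_intercalate hp hc),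
      fun hc => h2 (hint ▸ pv_mem_intercalate hp hc), fun hc => ?_⟩
    exact hfree p hp ((List.singleton_infix_iff _ _).2 hc)
  set es := PySem.List.enumerate (PySem.Chars.splitOn lhs [',']) with hes
  set fs : List (Bool × List Char) := es.map (fun q => (cs.contains q.1, q.2)) with hfs
  have hokfs : ∀ p ∈ fs, pvOkT p.2 := by
    intro p hp
    rw [hfs] at hp
    obtain ⟨q, hq, rfl⟩ := List.mem_map.1 hp
    exact hok q.2 (pv_enum_mem hq)
  have hSS : PySem.Chars.join [','] (es.map (fun q => if cs.contains q.1 then '[' :: q.2 ++ [']'] else q.2)) = pvSS fs := by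
    rw [hfs, pvSS, List.map_map]
    rfl
  have hBB : fs.foldl
      (fun (st : List (List Char) × List (List Char)) (q : Bool × List Char) =>
        if q.1 then (st.1, st.2 ++ [q.2])
        else ((if st.2.isEmpty then st.1 else st.1 ++ ['[' :: PySem.Chars.join [','] st.2 ++ [']']]) ++ [q.2], []))
      ([], []) =
      es.foldl
      (fun (st : List (List Char) × List (List Char)) q =>
        if cs.contains q.1 then (st.1, st.2 ++ [q.2])
        else ((if st.2.isEmpty then st.1 else st.1 ++ ['[' :: PySem.Chars.join [','] st.2 ++ [']']]) ++ [q.2], []))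
      ([], []) := by
    rw [hfs, List.foldl_map]
  rw [hSS]
  rw [show PySem.Chars.replace (pvSS fs ++ tail) [']', ',', '['] [','] =
      PySem.Chars.replace.go pvOld [','] (pvSS fs ++ tail).length (pvSS fs ++ tail) [] by
    simp [PySem.Chars.replace, pvOld]]
  rw [(pv_mainA fs.length fs le_rfl).1 tail [] (pvSS fs ++ tail).length hokfs h3 le_rfl]
  have := pv_fold_group fs [] []
  simp only [← hBB]
  simp only [this]
  simp [PySem.Chars.join]

-- helper: turn the Pre_ bracket conditions into plain non-membership
theorem pv_isIn_false {c : Char} {s : List Char} (h : PySem.Chars.isIn [c] s = false) : c ∉ s := by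
  intro hc
  rw [PySem.Chars.isIn_eq_false_iff] at h
  exact h ((List.singleton_infix_iff _ _).2 hc)

-- ===== VERDICT (by name: the statement is the Claim_ definition above) =====
theorem format_const_einsum_str_spec : Claim_equal_format_const_einsum_str := by
  intro es cs _hDom hPre
  unfold Spec_format_const_einsum_str format_const_einsum_str format_const_einsum_str_alt
  by_cases hc : cs.isEmpty
  · simp [hc]
  · have hc' : cs.isEmpty = false := by simpa using hc
    rcases hPre with hnil | ⟨hlen, hlb, hrb⟩
    · rw [hnil] at hc'; simp at hc'
    have h1 : '[' ∉ es.toList := pv_isIn_false hlb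
    have h2 : ']' ∉ es.toList := pv_isIn_false hrb
    simp only [hc', Bool.false_eq_true, if_false]
    by_cases hin : PySem.Chars.isIn ['-', '>'] es.toList
    · obtain ⟨hne, hint, hfree⟩ := pv_splitOn_spec ['-', '>'] es.toList (by simp)
      have hps : ∃ x y, PySem.Chars.splitOn es.toList ['-', '>'] = [x, y] := by
        match hm : PySem.Chars.splitOn es.toList ['-', '>'] with
        | [] => exact absurd hm hne
        | [x] =>
          exfalso
          rw [hm] at hint hfree
          have hx : x = es.toList := by simpa [List.intercalate] using hint
          have := hfree x (by simp)
          rw [hx] at this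
          exact this ((PySem.Chars.isIn_iff_infix _ _).1 hin)
        | x :: y :: z :: w =>
          exfalso
          rw [hm] at hlen
          simp at hlen
        | [x, y] => exact ⟨x, y, rfl⟩
      obtain ⟨x, y, hps⟩ := hps
      rw [hps] at hint
      have hsxy : es.toList = x ++ ['-', '>'] ++ y := by
        rw [← hint]; simp [List.intercalate]
      have hx1 : '[' ∉ x := fun h => h1 (hsxy ▸ by simp [h])
      have hx2 : ']' ∉ x := fun h => h2 (hsxy ▸ by simp [h])
      have htail : pvOkTail (['-', '>'] ++ y) := by
        constructor
        · intro h
          simp at h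
          exact h1 (hsxy ▸ by simp [h])
        · intro h
          simp at h
          exact h2 (hsxy ▸ by simp [h])
      simp only [hin, if_true, hps]
      rw [show (['-', '>'] : List Char) = ['-', '>'] from rfl]
      have := pv_final x (['-', '>'] ++ y) cs hx1 hx2 htail
      simp only [List.append_assoc] at this ⊢
      rw [this]
    · have hin' : PySem.Chars.isIn ['-', '>'] es.toList = false := by simpa using hin
      simp only [hin', Bool.false_eq_true, if_false]
      have := pv_final es.toList [] cs h1 h2 ⟨by simp, by simp⟩
      exact congrArg String.ofList (by simpa using this)
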